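-- pv_equiv track=rewrite | github.com/nkossally/image-encrypter | api/utilities.py | binary_string_matrices_to_binary_int_matrix
-- ===== SOURCE A (Python) =====
-- EIGHT = 8
--
-- def binary_string_matrices_to_binary_int_matrix(binary_str_matrices):
--     result = []
--     for i in range(0, len(binary_str_matrices), EIGHT):
--         string = ""
--         for j in range(EIGHT):
--             if i + j < len(binary_str_matrices):
--                 string += convert_binary_str_matrix_to_str(binary_str_matrices[i + j])
--         arr = list(map(int, list(string)))
--         result.append(arr)
--     return result
--
-- def convert_binary_str_matrix_to_str(binary_str_matrix):
--     def flatten_arr(arr):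
--         return "".join(arr)
--
--     joined_matrix = list(map(flatten_arr, binary_str_matrix))
--     joined_string = flatten_arr(joined_matrix)
--     return joined_string
-- ===== SOURCE B (Python) =====
-- EIGHT = 8
--
-- def binary_string_matrices_to_binary_int_matrix(binary_str_matrices):
--     result = []
--     current = None
--     for idx, matrix in enumerate(binary_str_matrices):
--         if idx % EIGHT == 0:
--             if current is not None:
--                 result.append(current)
--             current = []
--         for row in matrix:
--             for s in row:
--                 for c in s:
--                     current.append(int(c))
--     if current is not None:
--         result.append(current)
--     return result
-- ===== Notes on version B (the rewrite author's own statement) =====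
-- stated objective: alternative
-- what changed: B replaces A's chunk-indexed double loop (outer range stepping by 8, inner bounded index loop concatenating strings then mapping int) by a single streaming pass over enumerate(matrices) that appends digits into a current-row accumulator and flushes it into the result whenever the index hits a multiple of 8, with a final flush.
import Mathlib
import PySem

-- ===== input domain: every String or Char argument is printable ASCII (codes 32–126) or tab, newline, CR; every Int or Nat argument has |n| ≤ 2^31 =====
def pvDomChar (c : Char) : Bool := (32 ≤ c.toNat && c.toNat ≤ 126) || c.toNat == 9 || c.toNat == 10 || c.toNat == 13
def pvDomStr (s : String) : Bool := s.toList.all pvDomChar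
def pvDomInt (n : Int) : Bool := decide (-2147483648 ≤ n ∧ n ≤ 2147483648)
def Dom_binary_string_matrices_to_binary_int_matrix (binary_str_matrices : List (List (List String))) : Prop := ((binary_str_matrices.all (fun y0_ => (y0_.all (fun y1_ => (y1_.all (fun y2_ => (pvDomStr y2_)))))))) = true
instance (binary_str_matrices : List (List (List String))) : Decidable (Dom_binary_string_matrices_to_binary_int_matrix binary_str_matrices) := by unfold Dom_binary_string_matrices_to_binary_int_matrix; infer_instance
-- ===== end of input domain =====

-- B replaces A's chunk-indexed double loop by one streaming pass over enumerate with a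
-- current-row accumulator flushed at every index multiple of 8; same return value, same cost.

-- int(c) for a single character c (exact on the digit strings Pre_ admits; elsewhere A raises)
def pvIntChar (c : Char) : Int := (PySem.Int.ofChars? [c]).getD 0

-- ===== PORT A =====
-- "".join(arr), on the List Char side (PySem.Chars.join is exact for str.join)
def pvFlattenArr (arr : List (List Char)) : List Char := PySem.Chars.join [] arr

def convert_binary_str_matrix_to_str (binary_str_matrix : List (List String)) : List Char :=
  pvFlattenArr (binary_str_matrix.map (fun row => pvFlattenArr (row.map String.toList)))

def binary_string_matrices_to_binary_int_matrix (binary_str_matrices : List (List (List String))) : List (List Int) :=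
  (PySem.List.pyRange 0 binary_str_matrices.length 8).foldl (fun result i =>
    let string := (PySem.List.pyRange 0 8 1).foldl (fun s j =>
      if i + j < (binary_str_matrices.length : Int) then
        s ++ convert_binary_str_matrix_to_str (PySem.List.pyGetD binary_str_matrices (i + j) [])
      else s) ([] : List Char)
    result ++ [string.map pvIntChar]) []

-- ===== PORT B =====
-- one streaming step of Source B's loop body: flush at idx % 8 == 0, then append this matrix's digits
def pvStepB (st : List (List Int) × Option (List Int)) (p : Int × List (List String)) :
    List (List Int) × Option (List Int) :=
  let st1 : List (List Int) × Option (List Int) :=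
    if PySem.Int.mod p.1 8 == 0 then
      ((match st.2 with | some c => st.1 ++ [c] | none => st.1), some ([] : List Int))
    else st
  (st1.1, p.2.foldl (fun cur row =>
    row.foldl (fun cur s =>
      s.toList.foldl (fun cur c => cur.map (· ++ [pvIntChar c])) cur) cur) st1.2)

def binary_string_matrices_to_binary_int_matrix_alt (binary_str_matrices : List (List (List String))) : List (List Int) :=
  match ((PySem.List.enumerate binary_str_matrices).foldl pvStepB ([], none)).2 with
  | some c => ((PySem.List.enumerate binary_str_matrices).foldl pvStepB ([], none)).1 ++ [c]
  | none => ((PySem.List.enumerate binary_str_matrices).foldl pvStepB ([], none)).1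

-- ===== PRECONDITION & SPEC =====
-- Pre_ excludes exactly the inputs on which Python A raises ValueError: int(c) on a non-digit character.
def Pre_binary_string_matrices_to_binary_int_matrix (binary_str_matrices : List (List (List String))) : Prop :=
  (binary_str_matrices.all (fun m => m.all (fun row => row.all (fun s => s.toList.all Char.isDigit)))) = true
instance (binary_str_matrices : List (List (List String))) : Decidable (Pre_binary_string_matrices_to_binary_int_matrix binary_str_matrices) := by unfold Pre_binary_string_matrices_to_binary_int_matrix; infer_instance

def pvWitness_binary_string_matrices_to_binary_int_matrix : List (List (List String)) := [[["01", "1"], ["0"]], [["10"]]]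

def Spec_binary_string_matrices_to_binary_int_matrix (binary_str_matrices : List (List (List String))) (out : List (List Int)) : Prop := out = binary_string_matrices_to_binary_int_matrix_alt binary_str_matrices
instance (binary_str_matrices : List (List (List String))) (out : List (List Int)) : Decidable (Spec_binary_string_matrices_to_binary_int_matrix binary_str_matrices out) := by unfold Spec_binary_string_matrices_to_binary_int_matrix; infer_instance

-- ===== CLAIM (what is proved, stated in full; the proofs are below) =====
def Claim_equal_binary_string_matrices_to_binary_int_matrix : Prop := ∀ (binary_str_matrices : List (List (List String))), Dom_binary_string_matrices_to_binary_int_matrix binary_str_matrices → Pre_binary_string_matrices_to_binary_int_matrix binary_str_matrices → Spec_binary_string_matrices_to_binary_int_matrix binary_str_matrices (binary_string_matrices_to_binary_int_matrix binary_str_matrices)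

-- ===== LEMMAS AND PROOFS =====

-- the digit list of one matrix
def pvPer (m : List (List String)) : List Int :=
  m.flatMap (fun row => row.flatMap (fun s => s.toList.map pvIntChar))

-- common reference shape: the output, chunk by chunk of 8
def pvChunkRec : List (List (List String)) → List (List Int)
  | [] => []
  | m :: t => ((((m :: t).take 8).map pvPer).flatten) :: pvChunkRec (t.drop 7)
termination_by l => l.length
decreasing_by simp only [List.length_drop, List.length_cons]; omega

theorem pvChunkRec_nil : pvChunkRec [] = [] := by rw [pvChunkRec.eq_def]

theorem pvChunkRec_cons (m : List (List String)) (t : List (List (List String))) :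
    pvChunkRec (m :: t) = ((((m :: t).take 8).map pvPer).flatten) :: pvChunkRec (t.drop 7) := by
  rw [pvChunkRec.eq_def]

-- "".join is flatten
theorem pv_join_nil_flatten : ∀ (l : List (List Char)), PySem.Chars.join [] l = l.flatten := by
  intro l
  induction l with
  | nil => rfl
  | cons x xs ih =>
    cases xs with
    | nil => simp [PySem.Chars.join_singleton]
    | cons y ys => simpa [PySem.Chars.join_cons_cons] using ih

-- per-matrix agreement: mapping int over A's flattened string is the digit list
theorem pv_per_matrix (m : List (List String)) :
    (convert_binary_str_matrix_to_str m).map pvIntChar = pvPer m := by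
  simp [convert_binary_str_matrix_to_str, pvFlattenArr, pv_join_nil_flatten, pvPer,
    List.map_flatten, List.flatMap_def, List.map_map, Function.comp_def]

-- A's inner 8-bounded guarded loop equals flatten of the mapped 8-slice
theorem pv_chunk_fold {α β : Type} (f : α → List β) (d : α) :
    ∀ (m k : ℕ) (xs : List α) (acc : List β),
    (PySem.List.pyRange 0 m 1).foldl (fun s j =>
        if (k : Int) + j < (xs.length : Int) then s ++ f (PySem.List.pyGetD xs ((k : Int) + j) d) else s) acc
      = acc ++ (((xs.drop k).take m).map f).flatten := by
  intro m
  induction m with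
  | zero => intro k xs acc; simp [PySem.List.pyRange_one_eq_nil]
  | succ m ih =>
    intro k xs acc
    have hsplit : PySem.List.pyRange 0 ((m : Int) + 1) 1
        = PySem.List.pyRange 0 m 1 ++ [(m : Int)] :=
      PySem.List.pyRange_one_succ_right (by positivity)
    have hcast : ((m + 1 : ℕ) : Int) = (m : Int) + 1 := by push_cast; ring
    rw [hcast, hsplit, List.foldl_append, ih]
    simp only [List.foldl_cons, List.foldl_nil]
    by_cases h : k + m < xs.length
    · have hlt : (k : Int) + (m : Int) < (xs.length : Int) := by exact_mod_cast h
      have hget : PySem.List.pyGetD xs ((k : Int) + (m : Int)) d = xs.getD (k + m) d := by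
        have : (k : Int) + (m : Int) = ((k + m : ℕ) : Int) := by push_cast; ring
        rw [this, PySem.List.pyGetD_natCast]
      have hdg : (xs.drop k).take (m + 1) = (xs.drop k).take m ++ [xs.getD (k + m) d] := by
        have hx : xs[k + m]? = some (xs[k + m]'h) := List.getElem?_eq_getElem h
        rw [List.take_add_one, List.getElem?_drop, hx]
        simp [List.getD, hx]
      simp [hlt, hget, hdg, List.append_assoc]
    · have hge : ¬ ((k : Int) + (m : Int) < (xs.length : Int)) := by omega
      have h1 : (xs.drop k).length ≤ m := by simp; omega
      have hdg : (xs.drop k).take (m + 1) = (xs.drop k).take m := by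
        rw [List.take_of_length_le h1, List.take_of_length_le (by omega)]
      simp [hge, hdg]

-- step-8 range unfolds one element at a time
theorem pv_pyRange8_cons (b : Int) (hb : 0 < b) :
    PySem.List.pyRange 0 b 8 = 0 :: (PySem.List.pyRange 0 (b - 8) 8).map (· + 8) := by
  rw [PySem.List.pyRange_of_pos 0 b (by norm_num), PySem.List.pyRange_of_pos 0 (b - 8) (by norm_num)]
  by_cases h8 : 8 < b
  · rw [if_pos hb, if_pos (show (0:Int) < b - 8 by omega)]
    have hn : ((b - 0 + 8 - 1) / 8).toNat = ((b - 8 - 0 + 8 - 1) / 8).toNat + 1 := by omega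
    rw [hn, List.range_succ_eq_map, List.map_cons, List.map_map, List.map_map]
    simp only [List.cons.injEq]
    refine ⟨by norm_num, ?_⟩
    apply List.map_congr_left
    intro k _
    simp only [Function.comp]
    push_cast
    ring
  · rw [if_pos hb, if_neg (show ¬ (0:Int) < b - 8 by omega)]
    have hn : ((b - 0 + 8 - 1) / 8).toNat = 1 := by omega
    rw [hn]
    simp [List.range_succ_eq_map]

-- the range-indexed chunk map is pvChunkRec
theorem pv_chunkA (bs : List (List (List String))) :
    (PySem.List.pyRange 0 bs.length 8).map
        (fun i => (((bs.drop i.toNat).take 8).map pvPer).flatten) = pvChunkRec bs := by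
  generalize hn : bs.length = n
  induction n using Nat.strong_induction_on generalizing bs with
  | _ n ih =>
    cases bs with
    | nil =>
      have h0 : n = 0 := by simpa using hn.symm
      subst h0
      rw [pvChunkRec_nil, Nat.cast_zero, PySem.List.pyRange_of_pos 0 0 (by norm_num)]
      simp
    | cons m t =>
      subst hn
      have hpos : (0 : Int) < ((m :: t).length : Int) := by
        simp
      rw [pv_pyRange8_cons _ hpos, List.map_cons, List.map_map, pvChunkRec_cons]
      simp only [List.cons.injEq]
      refine ⟨by simp, ?_⟩
      have hrange : PySem.List.pyRange 0 (((m :: t).length : Int) - 8) 8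
          = PySem.List.pyRange 0 ((t.drop 7).length : Int) 8 := by
        by_cases h8 : 8 ≤ (m :: t).length
        · have : ((t.drop 7).length : Int) = ((m :: t).length : Int) - 8 := by
            simp only [List.length_drop, List.length_cons]
            simp only [List.length_cons] at h8
            omega
          rw [this]
        · have h2 : (t.drop 7).length = 0 := by
            simp only [List.length_drop]
            simp only [List.length_cons] at h8
            omega
          have h1 : ¬ ((0:Int) < ((m :: t).length : Int) - 8) := by
            simp only [List.length_cons] at h8 ⊢
            push_cast
            omega
          rw [h2, Nat.cast_zero,
              PySem.List.pyRange_of_pos 0 _ (by norm_num : (0:Int) < 8),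
              PySem.List.pyRange_of_pos 0 _ (by norm_num : (0:Int) < 8)]
          rw [if_neg h1, if_neg (by norm_num)]
      rw [hrange]
      have hsm : (t.drop 7).length < (m :: t).length := by
        simp only [List.length_drop, List.length_cons]
        omega
      rw [← ih (t.drop 7).length hsm (t.drop 7) rfl]
      apply List.map_congr_left
      intro i hi
      have hmem := (PySem.List.mem_pyRange_iff_of_pos (by norm_num : (0:Int) < 8) i).1 hi
      have h0 : 0 ≤ i := by omega
      have htn : (i + 8).toNat = i.toNat + 8 := by omega
      simp only [Function.comp, htn]
      have hdrop : (m :: t).drop (i.toNat + 8) = (t.drop 7).drop i.toNat := by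
        rw [show i.toNat + 8 = (i.toNat + 7) + 1 by omega, List.drop_succ_cons, List.drop_drop]
        congr 1
        omega
      rw [hdrop]

-- A equals the chunk shape
theorem pv_A_eq_chunk (bs : List (List (List String))) :
    binary_string_matrices_to_binary_int_matrix bs = pvChunkRec bs := by
  unfold binary_string_matrices_to_binary_int_matrix
  rw [PySem.List.foldl_append_singleton_eq_map]
  rw [← pv_chunkA bs]
  simp only [List.nil_append]
  apply List.map_congr_left
  intro i hi
  have hmem := (PySem.List.mem_pyRange_iff_of_pos (by norm_num : (0:Int) < 8) i).1 hi
  have h0 : 0 ≤ i := by omega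
  obtain ⟨k, rfl⟩ : ∃ k : ℕ, i = (k : Int) := ⟨i.toNat, (Int.toNat_of_nonneg h0).symm⟩
  have h8 : (8 : Int) = ((8 : ℕ) : Int) := by norm_num
  rw [h8]
  rw [pv_chunk_fold (convert_binary_str_matrix_to_str) ([] : List (List String)) 8 k bs []]
  simp [List.map_flatten, List.map_map, Function.comp_def, pv_per_matrix]

-- the char-by-char option-append loop of one string
theorem pv_str_fold (s : List Char) : ∀ (x : List Int),
    s.foldl (fun cur c => cur.map (· ++ [pvIntChar c])) (some x)
      = some (x ++ s.map pvIntChar) := by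
  induction s with
  | nil => intro x; simp
  | cons c cs ih => intro x; simp [ih, List.append_assoc]

-- the full inner triple loop of one matrix appends pvPer
theorem pv_matrix_fold (m : List (List String)) : ∀ (x : List Int),
    m.foldl (fun cur row =>
        row.foldl (fun cur s =>
          s.toList.foldl (fun cur c => cur.map (· ++ [pvIntChar c])) cur) cur) (some x)
      = some (x ++ pvPer m) := by
  induction m with
  | nil => intro x; simp [pvPer]
  | cons row rest ih =>
    intro x
    have hrow : ∀ (r : List String) (y : List Int),
        r.foldl (fun cur s =>
          s.toList.foldl (fun cur c => cur.map (· ++ [pvIntChar c])) cur) (some y)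
        = some (y ++ r.flatMap (fun s => s.toList.map pvIntChar)) := by
      intro r
      induction r with
      | nil => intro y; simp
      | cons s ss ihs => intro y; simp [pv_str_fold, ihs, List.append_assoc]
    simp only [List.foldl_cons, hrow, ih]
    simp [pvPer, List.append_assoc]

-- the continuation of Source B's loop from index i with current row cur
def pvCont (i : Int) (cur : List Int) : List (List (List String)) → List (List Int)
  | [] => [cur]
  | m :: t =>
    if PySem.Int.mod i 8 = 0 then cur :: pvCont (i + 1) (pvPer m) t
    else pvCont (i + 1) (cur ++ pvPer m) t

-- the enumerate fold computes pvCont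
theorem pv_fold_cont : ∀ (l : List (List (List String))) (i : Int) (res : List (List Int)) (cur : List Int),
    (match ((PySem.List.enumerate l i).foldl pvStepB (res, some cur)).2 with
      | some c => ((PySem.List.enumerate l i).foldl pvStepB (res, some cur)).1 ++ [c]
      | none => ((PySem.List.enumerate l i).foldl pvStepB (res, some cur)).1)
      = res ++ pvCont i cur l := by
  intro l
  induction l with
  | nil => intro i res cur; simp [PySem.List.enumerate_nil, pvCont]
  | cons m t ih =>
    intro i res cur
    rw [PySem.List.enumerate_cons, List.foldl_cons]
    by_cases h : PySem.Int.mod i 8 = 0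
    · have hstep : pvStepB (res, some cur) (i, m) = (res ++ [cur], some (pvPer m)) := by
        have hd : (8 : Int) ∣ i := (PySem.Int.mod_eq_zero_iff_dvd i 8).1 h
        simp only [pvStepB]
        simp [hd, pv_matrix_fold]
      rw [hstep, ih, pvCont, if_pos h]
      simp
    · have hstep : pvStepB (res, some cur) (i, m) = (res, some (cur ++ pvPer m)) := by
        have hd : ¬ ((8 : Int) ∣ i) := fun d => h ((PySem.Int.mod_eq_zero_iff_dvd i 8).2 d)
        simp only [pvStepB]
        simp [hd, pv_matrix_fold]
      rw [hstep, ih, pvCont, if_neg h]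

-- pvCont matches the chunk shape
theorem pv_cont_chunk : ∀ (l : List (List (List String))) (i : Int) (cur : List Int), 0 ≤ i →
    pvCont i cur l =
      if PySem.Int.mod i 8 = 0 then cur :: pvChunkRec l
      else (cur ++ ((l.take (8 - (PySem.Int.mod i 8)).toNat).map pvPer).flatten)
            :: pvChunkRec (l.drop (8 - (PySem.Int.mod i 8)).toNat) := by
  intro l
  induction l with
  | nil =>
    intro i cur _
    by_cases h : PySem.Int.mod i 8 = 0 <;> simp [pvCont, pvChunkRec_nil]
  | cons m t ih =>
    intro i cur h0
    have hmod : PySem.Int.mod i 8 = i % 8 := PySem.Int.mod_eq_emod_of_pos (by norm_num)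
    have hmod1 : PySem.Int.mod (i + 1) 8 = (i + 1) % 8 := PySem.Int.mod_eq_emod_of_pos (by norm_num)
    by_cases h : PySem.Int.mod i 8 = 0
    · rw [pvCont, if_pos h, if_pos h]
      have h1 : PySem.Int.mod (i + 1) 8 = 1 := by
        rw [hmod1]
        rw [hmod] at h
        omega
      rw [ih (i + 1) (pvPer m) (by omega), if_neg (by rw [h1]; norm_num), h1,
          show ((8:Int) - 1).toNat = 7 by decide, pvChunkRec_cons]
      simp [List.take_succ_cons]
    · rw [pvCont, if_neg h, if_neg h]
      have hr : 0 < i % 8 ∧ i % 8 < 8 := by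
        rw [hmod] at h
        omega
      by_cases h7 : i % 8 = 7
      · have h1 : PySem.Int.mod (i + 1) 8 = 0 := by
          rw [hmod1]
          omega
        rw [ih (i + 1) (cur ++ pvPer m) (by omega), if_pos h1, hmod, h7,
            show ((8:Int) - 7).toNat = 1 by decide]
        simp
      · have h1 : PySem.Int.mod (i + 1) 8 = i % 8 + 1 := by
          rw [hmod1]
          omega
        rw [ih (i + 1) (cur ++ pvPer m) (by omega), if_neg (by rw [h1]; omega), h1, hmod]
        rw [show ((8:Int) - i % 8).toNat = ((8:Int) - (i % 8 + 1)).toNat + 1 by omega]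
        simp [List.take_succ_cons, List.append_assoc]

-- B equals the chunk shape
theorem pv_B_eq_chunk (bs : List (List (List String))) :
    binary_string_matrices_to_binary_int_matrix_alt bs = pvChunkRec bs := by
  cases bs with
  | nil =>
    rw [pvChunkRec_nil]
    simp [binary_string_matrices_to_binary_int_matrix_alt, PySem.List.enumerate_nil]
  | cons m t =>
    unfold binary_string_matrices_to_binary_int_matrix_alt
    rw [PySem.List.enumerate_cons, List.foldl_cons]
    have hstep : pvStepB ([], none) (0, m) = (([] : List (List Int)), some (pvPer m)) := by
      have h0 : PySem.Int.mod 0 8 = 0 := by decide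
      simp only [pvStepB]
      simp [pv_matrix_fold]
    rw [hstep, show (0 : Int) + 1 = 1 by norm_num]
    have hfc := pv_fold_cont t 1 [] (pvPer m)
    simp only [List.nil_append] at hfc
    rw [hfc]
    have h1 : PySem.Int.mod 1 8 = 1 := by decide
    rw [pv_cont_chunk t 1 (pvPer m) (by norm_num), if_neg (by rw [h1]; norm_num), h1,
        show ((8:Int) - 1).toNat = 7 by decide, pvChunkRec_cons]
    simp [List.take_succ_cons]

-- ===== VERDICT (by name: the statement is the Claim_ definition above) =====
theorem binary_string_matrices_to_binary_int_matrix_spec : Claim_equal_binary_string_matrices_to_binary_int_matrix := by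
  intro bs _ _
  unfold Spec_binary_string_matrices_to_binary_int_matrix
  rw [pv_A_eq_chunk, pv_B_eq_chunk]
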